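-- pv_equiv track=rewrite | github.com/FilipMiletic/cacl-ocl | prep_data/lowercase_one_sentence_per_line.py | safe_token_lowercase
-- ===== SOURCE A (Python) =====
-- def safe_token_lowercase(token: str) -> str:
--     """Lowercases a (possibly tagged) token, preserving POS capitalization."""
--     parts = token.split(':')
--     try:
--         # standard tagged case ("model:NOUN")
--         base, pos = parts
--         out = ':'.join([base.lower(), pos])
--     except ValueError:
--         if len(parts) == 1:
--             # no tagging ("model")
--             out = parts[0].lower()
--         else:
--             # multiple colons ("some:noise:NOUN", "::PUNCT")
--             out = []
--             for part in parts[:-1]: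
--                 out.append(part.lower())
--             out.append(parts[-1])
--             out = ':'.join(out)
--     return out
-- ===== SOURCE B (Python) =====
-- def safe_token_lowercase(token: str) -> str:
--     """Lowercases a (possibly tagged) token, preserving POS capitalization."""
--     base, sep, pos = token.rpartition(':')
--     if not sep:
--         return token.lower()
--     return base.lower() + ':' + pos
-- ===== Notes on version B (the rewrite author's own statement) =====
-- stated objective: simpler
-- what changed: Replaces split-into-all-parts with try/except unpacking and a loop over the parts by a single rpartition at the last colon: lowercase the whole prefix at once (lower() leaves ':' unchanged) and keep the last segment verbatim.
import Mathlib
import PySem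

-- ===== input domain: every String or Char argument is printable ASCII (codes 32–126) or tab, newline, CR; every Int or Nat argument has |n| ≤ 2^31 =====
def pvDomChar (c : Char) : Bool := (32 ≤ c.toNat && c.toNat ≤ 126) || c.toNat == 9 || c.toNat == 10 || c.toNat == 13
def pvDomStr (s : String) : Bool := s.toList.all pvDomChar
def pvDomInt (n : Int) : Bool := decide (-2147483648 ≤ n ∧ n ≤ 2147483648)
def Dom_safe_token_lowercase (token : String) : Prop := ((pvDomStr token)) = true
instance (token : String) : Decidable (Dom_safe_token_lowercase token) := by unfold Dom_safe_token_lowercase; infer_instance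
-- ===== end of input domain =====

-- B replaces A's split-all-parts + try/except + loop by one right-partition at the last colon (simpler).

-- ===== PORT A =====
-- parts = token.split(':'); try base,pos = parts; except: len==1 branch or loop over parts[:-1]
def safe_token_lowercase (token : String) : String :=
  let parts := PySem.Chars.splitOn token.toList [':']
  match parts with
  | [base, pos] => String.ofList (PySem.Chars.join [':'] [PySem.Chars.lower base, pos])
  | _ =>
    if parts.length = 1 then
      String.ofList (PySem.Chars.lower (PySem.List.pyGetD parts 0 []))
    else
      let out := (PySem.List.slice parts none (some (-1))).foldl
        (fun acc part => acc ++ [PySem.Chars.lower part]) []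
      let out := out ++ [PySem.List.pyGetD parts (-1) []]
      String.ofList (PySem.Chars.join [':'] out)

-- ===== PORT B =====
-- hand port of str.rpartition(':') (PySem has no rpartition): splits at the LAST colon,
-- none = no colon present; exact by construction on List Char
def rpartitionColon : List Char → Option (List Char × List Char)
  | [] => none
  | c :: rest =>
    match rpartitionColon rest with
    | some (pre, post) => some (c :: pre, post)
    | none => if c = ':' then some ([], rest) else none

def safe_token_lowercase_alt (token : String) : String :=
  match rpartitionColon token.toList with
  | none => String.ofList (PySem.Chars.lower token.toList)
  | some (base, pos) => String.ofList (PySem.Chars.lower base ++ [':'] ++ pos)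

-- ===== PRECONDITION & SPEC =====
def Spec_safe_token_lowercase (token : String) (out : String) : Prop := out = safe_token_lowercase_alt token
instance (token : String) (out : String) : Decidable (Spec_safe_token_lowercase token out) := by unfold Spec_safe_token_lowercase; infer_instance

-- ===== CLAIM (what is proved, stated in full; the proofs are below) =====
def Claim_equal_safe_token_lowercase : Prop := ∀ (token : String), Dom_safe_token_lowercase token → Spec_safe_token_lowercase token (safe_token_lowercase token)

-- ===== LEMMAS AND PROOFS =====

-- simple structural split on ':' used to reason about PySem.Chars.splitOn
def splitC : List Char → List (List Char)
  | [] => [[]]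
  | c :: rest =>
    if c = ':' then [] :: splitC rest
    else
      let r := splitC rest
      (c :: r.headD []) :: r.tail

theorem splitC_ne_nil (cs : List Char) : splitC cs ≠ [] := by
  cases cs with
  | nil => simp [splitC]
  | cons c rest => simp [splitC]; split <;> simp

theorem splitOn_go_spec (l : List Char) : ∀ (fuel : Nat) (cur : List Char)
    (acc : List (List Char)), l.length < fuel →
    PySem.Chars.splitOn.go [':'] fuel l cur acc
      = acc.reverse ++ (splitC l).modifyHead (cur.reverse ++ ·) := by
  induction l with
  | nil =>
    intro fuel cur acc h
    match fuel, h with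
    | fuel + 1, _ => simp [PySem.Chars.splitOn.go, splitC]
  | cons c rest ih =>
    intro fuel cur acc h
    match fuel, h with
    | fuel + 1, h =>
      simp only [PySem.Chars.splitOn.go]
      by_cases hc : c = ':'
      · subst hc
        simp only [List.isPrefixOf, BEq.rfl, Bool.true_and, if_pos, List.length_cons,
          List.length_nil, List.drop_succ_cons, List.drop_zero]
        rw [ih fuel [] (cur.reverse :: acc) (by simpa using h)]
        cases hr : splitC rest with
        | nil => exact absurd hr (splitC_ne_nil rest)
        | cons p ps => simp [splitC, hr]
      · have hpre : [':'].isPrefixOf (c :: rest) = false := by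
          simp [List.isPrefixOf]; exact fun he => (hc he.symm).elim
        rw [hpre]
        simp only [Bool.false_eq_true, if_false]
        rw [ih fuel (c :: cur) acc (by simpa using h)]
        cases hr : splitC rest with
        | nil => exact absurd hr (splitC_ne_nil rest)
        | cons p ps => simp [splitC, hr, hc]

theorem splitOn_eq_splitC (cs : List Char) :
    PySem.Chars.splitOn cs [':'] = splitC cs := by
  rw [PySem.Chars.splitOn, splitOn_go_spec cs (cs.length + 1) [] [] (by omega)]
  cases hr : splitC cs with
  | nil => exact absurd hr (splitC_ne_nil cs)
  | cons p ps => simp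

theorem intercalate_cons {α : Type} (sep x : List α) (ps : List (List α)) (h : ps ≠ []) :
    List.intercalate sep (x :: ps) = x ++ sep ++ List.intercalate sep ps := by
  cases ps with
  | nil => exact absurd rfl h
  | cons y t => simp [List.intercalate, List.intersperse, List.append_assoc]

theorem intercalate_concat {α : Type} (sep y : List α) (xs : List (List α)) (h : xs ≠ []) :
    List.intercalate sep (xs ++ [y]) = List.intercalate sep xs ++ sep ++ y := by
  induction xs with
  | nil => exact absurd rfl h
  | cons x t ih =>
    cases t with
    | nil => simp [List.intercalate, List.intersperse]
    | cons z t' =>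
      rw [List.cons_append, intercalate_cons sep x (z :: t' ++ [y]) (by simp),
          intercalate_cons sep x (z :: t') (by simp), ih (by simp)]
      simp [List.append_assoc]

theorem join_lower_splitC (cs : List Char) :
    PySem.Chars.join [':'] ((splitC cs).map PySem.Chars.lower) = PySem.Chars.lower cs := by
  induction cs with
  | nil => simp [splitC, PySem.Chars.join, PySem.Chars.lower, List.intercalate]
  | cons c rest ih =>
    by_cases hc : c = ':'
    · subst hc
      rw [show splitC (':' :: rest) = [] :: splitC rest from by simp [splitC]]
      rw [List.map_cons, PySem.Chars.join, intercalate_cons _ _ _ (by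
        intro he; exact splitC_ne_nil rest (by simpa using he))]
      rw [← PySem.Chars.join, ih]
      simp [PySem.Chars.lower, PySem.Chars.lowerChar, PySem.Chars.isupper]
    · cases hr : splitC rest with
      | nil => exact absurd hr (splitC_ne_nil rest)
      | cons p ps =>
        rw [show splitC (c :: rest) = (c :: p) :: ps from by simp [splitC, hc, hr]]
        rw [hr] at ih
        cases ps with
        | nil =>
          simp [List.intercalate, PySem.Chars.join, PySem.Chars.lower] at ih ⊢
          simp [ih]
        | cons q qs =>
          rw [List.map_cons, PySem.Chars.join, intercalate_cons _ _ _ (by simp)]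
          rw [List.map_cons, PySem.Chars.join, intercalate_cons _ _ _ (by simp)] at ih
          have hl : PySem.Chars.lower (c :: p) = PySem.Chars.lowerChar c :: PySem.Chars.lower p := by
            simp [PySem.Chars.lower]
          have hr2 : PySem.Chars.lower (c :: rest) = PySem.Chars.lowerChar c :: PySem.Chars.lower rest := by
            simp [PySem.Chars.lower]
          rw [hl, hr2, ← ih]
          simp

theorem rpart_none {cs : List Char} (h : rpartitionColon cs = none) : splitC cs = [cs] := by
  induction cs with
  | nil => simp [splitC]
  | cons c rest ih =>
    rw [rpartitionColon] at h
    cases hrp : rpartitionColon rest with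
    | some pr => rw [hrp] at h; exact absurd h (by cases pr; simp)
    | none =>
      rw [hrp] at h
      by_cases hc : c = ':'
      · rw [if_pos hc] at h; simp at h
      · simp [splitC, hc, ih hrp]

theorem rpart_some {cs b p : List Char} (h : rpartitionColon cs = some (b, p)) :
    splitC cs = splitC b ++ [p] := by
  induction cs generalizing b p with
  | nil => simp [rpartitionColon] at h
  | cons c rest ih =>
    rw [rpartitionColon] at h
    cases hrp : rpartitionColon rest with
    | some pr =>
      obtain ⟨pre, post⟩ := pr
      rw [hrp] at h
      simp at h
      obtain ⟨hb, hp⟩ := h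
      subst hp
      have ihh := ih hrp
      by_cases hc : c = ':'
      · subst hc hb
        simp [splitC, ihh]
      · subst hb
        cases hq : splitC pre with
        | nil => exact absurd hq (splitC_ne_nil pre)
        | cons q qs =>
          rw [hq] at ihh
          simp [splitC, hc, ihh, hq]
    | none =>
      rw [hrp] at h
      by_cases hc : c = ':'
      · rw [if_pos hc] at h
        simp at h
        obtain ⟨hb, hp⟩ := h
        subst hp
        subst hb hc
        simp [splitC, rpart_none hrp]
      · rw [if_neg hc] at h; simp at h

theorem slice_neg_one_dropLast {α : Type} (xs : List α) :
    PySem.List.slice xs none (some (-1)) = xs.dropLast := by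
  simp [PySem.List.slice, PySem.List.clampIdx, List.dropLast_eq_take]
  split <;> rename_i h
  · simp [h]
  · have h0 : xs.length ≠ 0 := by simpa [List.length_eq_zero_iff] using h
    have : (↑xs.length + (-1 : Int)).toNat = xs.length - 1 := by omega
    omega

theorem pyGetD_concat_neg_one {α : Type} (xs : List α) (y d : α) :
    PySem.List.pyGetD (xs ++ [y]) (-1) d = y := by
  simp [PySem.List.pyGetD, PySem.List.pyGet?, PySem.List.pyIdx?]

theorem main_eq (token : String) : safe_token_lowercase token = safe_token_lowercase_alt token := by
  unfold safe_token_lowercase safe_token_lowercase_alt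
  simp only [splitOn_eq_splitC]
  cases hrp : rpartitionColon token.toList with
  | none =>
    have hs : splitC token.toList = [token.toList] := rpart_none hrp
    split
    · rename_i base pos h
      rw [hs] at h
      simp at h
    · rw [hs]
      simp [PySem.List.pyGetD, PySem.List.pyGet?, PySem.List.pyIdx?]
  | some pr =>
    obtain ⟨b, p⟩ := pr
    have hs : splitC token.toList = splitC b ++ [p] := rpart_some hrp
    split
    · -- the ("base:POS") two-part unpack succeeded: splitC b = [base], p = pos
      rename_i base pos h
      rw [hs] at h
      have hb1 : splitC b = [base] ∧ p = pos := by
        cases hq : splitC b with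
        | nil => exact absurd hq (splitC_ne_nil b)
        | cons q qs =>
          rw [hq] at h
          cases qs with
          | nil => simpa using h
          | cons r rs => simp at h
      obtain ⟨hb1, hp⟩ := hb1
      subst hp
      have hlow : PySem.Chars.lower base = PySem.Chars.lower b := by
        have hj := join_lower_splitC b
        rw [hb1] at hj
        simpa [PySem.Chars.join, List.intercalate] using hj
      rw [PySem.Chars.join, intercalate_cons _ _ _ (by simp)]
      simp [List.intercalate, hlow]
    · -- fell through to the except-branch: parts = splitC b ++ [p] has ≥ 2 elements
      rw [hs]
      have hlen : (splitC b ++ [p]).length ≠ 1 := by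
        have := splitC_ne_nil b
        cases hq : splitC b with
        | nil => exact absurd hq this
        | cons q qs => simp
      rw [if_neg hlen]
      rw [slice_neg_one_dropLast, List.dropLast_concat, pyGetD_concat_neg_one]
      rw [PySem.List.foldl_append_singleton_eq_map]
      simp only [List.nil_append]
      rw [PySem.Chars.join,
          intercalate_concat [':'] p ((splitC b).map PySem.Chars.lower)
            (by have := splitC_ne_nil b; simpa using this)]
      have hj := join_lower_splitC b
      rw [PySem.Chars.join] at hj
      rw [hj]

-- ===== VERDICT (by name: the statement is the Claim_ definition above) =====
theorem safe_token_lowercase_spec : Claim_equal_safe_token_lowercase := by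
  intro token _
  unfold Spec_safe_token_lowercase
  exact main_eq token
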